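-- pv_equiv track=rewrite | github.com/rookinc/xalchemy_lab | src/xalchemy_lab/paper/tri_patch/run_tri_patch_holonomy_snf_probe.py | smith_invariants_from_minors
-- ===== SOURCE A (Python) =====
-- from math import gcd
-- from itertools import combinations
--
-- def det_bareiss(mat: list[list[int]]) -> int:
--     n = len(mat)
--     if n == 0:
--         return 1
--     a = [row[:] for row in mat]
--     sign = 1
--     prev = 1
--     for k in range(n - 1):
--         pivot = a[k][k]
--         if pivot == 0:
--             swap_row = None
--             for i in range(k + 1, n):
--                 if a[i][k] != 0:
--                     swap_row = i
--                     break
--             if swap_row is None: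
--                 return 0
--             a[k], a[swap_row] = a[swap_row], a[k]
--             sign *= -1
--             pivot = a[k][k]
--         for i in range(k + 1, n):
--             for j in range(k + 1, n):
--                 a[i][j] = (a[i][j] * pivot - a[i][k] * a[k][j]) // prev
--         prev = pivot
--         for i in range(k + 1, n):
--             a[i][k] = 0
--         for j in range(k + 1, n):
--             a[k][j] = 0
--     return sign * a[n - 1][n - 1]
--
-- def gcd_list(values: list[int]) -> int:
--     g = 0
--     for v in values:
--         g = gcd(g, abs(v))
--     return g
--
-- def minors_gcd(matrix: list[list[int]], k: int) -> int:
--     rows = len(matrix)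
--     cols = len(matrix[0]) if matrix else 0
--     vals: list[int] = []
--     for row_idx in combinations(range(rows), k):
--         for col_idx in combinations(range(cols), k):
--             sub = [[matrix[r][c] for c in col_idx] for r in row_idx]
--             vals.append(det_bareiss(sub))
--     return gcd_list(vals)
--
-- def smith_invariants_from_minors(matrix: list[list[int]]) -> list[int]:
--     rows = len(matrix)
--     cols = len(matrix[0]) if matrix else 0
--     max_k = min(rows, cols)
--     d_prev = 1
--     invs: list[int] = []
--     for k in range(1, max_k + 1):
--         d_k = minors_gcd(matrix, k)
--         if d_k == 0:
--             break
--         invs.append(d_k // d_prev)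
--         d_prev = d_k
--     return invs
-- ===== SOURCE B (Python) =====
-- # B: same Smith invariants from minor gcds, but: recursive condensation determinant
-- # (no in-place elimination/zeroing), recursive lexicographic subset folding instead of
-- # itertools.combinations + a materialised list of minors, and incremental gcd with
-- # short-circuit once the gcd reaches 1.
-- from math import gcd
--
--
-- def _det(a, sign, prev):
--     # fraction-free one-step condensation: reduce an n x n matrix to (n-1) x (n-1)
--     if len(a) == 1:
--         return sign * a[0][0]
--     p = a[0][0]
--     if p == 0:
--         r = next((i for i in range(1, len(a)) if a[i][0] != 0), None)
--         if r is None: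
--             return 0
--         a = a[:]
--         a[0], a[r] = a[r], a[0]
--         sign = -sign
--         p = a[0][0]
--     b = [[(row[j] * p - row[0] * a[0][j]) // prev for j in range(1, len(a))]
--          for row in a[1:]]
--     return _det(b, sign, p)
--
--
-- def _fold_subsets(lo, hi, need, chosen, g, leaf):
--     # fold `leaf` over all sorted `need`-subsets of range(lo, hi) in lex order,
--     # stopping as soon as the accumulated gcd is 1
--     if g == 1:
--         return 1
--     if need == 0:
--         return leaf(chosen, g)
--     for i in range(lo, hi - need + 1):
--         g = _fold_subsets(i + 1, hi, need - 1, chosen + [i], g, leaf)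
--     return g
--
--
-- def _minors_gcd(matrix, cols, k):
--     def row_leaf(rsel, g):
--         def col_leaf(csel, g2):
--             sub = [[matrix[r][c] for c in csel] for r in rsel]
--             return gcd(g2, abs(_det(sub, 1, 1)))
--         return _fold_subsets(0, cols, k, [], g, col_leaf)
--     return _fold_subsets(0, len(matrix), k, [], 0, row_leaf)
--
--
-- def smith_invariants_from_minors(matrix):
--     rows = len(matrix)
--     cols = len(matrix[0]) if matrix else 0
--     d_prev = 1
--     invs = []
--     for k in range(1, min(rows, cols) + 1):
--         d_k = _minors_gcd(matrix, cols, k)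
--         if d_k == 0:
--             break
--         invs.append(d_k // d_prev)
--         d_prev = d_k
--     return invs
-- ===== Notes on version B (the rewrite author's own statement) =====
-- stated objective: faster
-- what changed: B replaces A's in-place Bareiss elimination (mutation, row/column zeroing) by a recursive fraction-free condensation determinant, replaces itertools.combinations plus a materialised list of all minors by a recursive lexicographic subset fold, and accumulates the gcd incrementally with a short-circuit as soon as it reaches 1.
import Mathlib
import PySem

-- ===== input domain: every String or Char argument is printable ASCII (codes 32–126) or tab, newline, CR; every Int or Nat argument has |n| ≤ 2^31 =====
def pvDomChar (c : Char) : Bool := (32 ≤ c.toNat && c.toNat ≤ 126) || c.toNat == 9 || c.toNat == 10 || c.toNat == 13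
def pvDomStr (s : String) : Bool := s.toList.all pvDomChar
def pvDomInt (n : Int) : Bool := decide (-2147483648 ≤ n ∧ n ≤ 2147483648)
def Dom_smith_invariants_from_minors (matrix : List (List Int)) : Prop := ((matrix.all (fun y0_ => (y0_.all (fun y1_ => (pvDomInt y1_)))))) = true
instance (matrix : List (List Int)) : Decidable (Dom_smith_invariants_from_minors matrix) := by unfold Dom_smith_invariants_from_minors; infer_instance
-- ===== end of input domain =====

-- B replaces A's in-place Bareiss elimination and materialised list of all k×k minors by a
-- recursive condensation determinant and a recursive subset fold with gcd short-circuit at 1.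

-- ===== PORT A =====

-- a[i][j] (indices produced by the algorithms are in range; default is never semantically used there)
def pvE (a : List (List Int)) (i j : Nat) : Int := (a.getD i []).getD j 0

-- a[k], a[i] = a[i], a[k]
def pvSwapRows (a : List (List Int)) (k i : Nat) : List (List Int) :=
  (a.set k (a.getD i [])).set i (a.getD k [])

-- for i in range(k+1,n): for j in range(k+1,n): a[i][j] = (a[i][j]*pivot - a[i][k]*a[k][j]) // prev
def pvElim (k : Nat) (pivot prev : Int) (a : List (List Int)) : List (List Int) :=
  a.mapIdx (fun i row => if k < i then
    row.mapIdx (fun j x => if k < j then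
      PySem.Int.floordiv (x * pivot - row.getD k 0 * pvE a k j) prev else x)
    else row)

-- for i in range(k+1,n): a[i][k] = 0
def pvZeroCol (k : Nat) (a : List (List Int)) : List (List Int) :=
  a.mapIdx (fun i row => if k < i then row.set k 0 else row)

-- for j in range(k+1,n): a[k][j] = 0
def pvZeroRow (k : Nat) (a : List (List Int)) : List (List Int) :=
  a.mapIdx (fun i row => if i = k then row.mapIdx (fun j x => if k < j then 0 else x) else row)

-- the body of det_bareiss's `for k in range(n-1)` loop; `steps` = n-1-k, the remaining iterations
def detBareissLoop (n : Nat) : Nat → Nat → List (List Int) → Int → Int → Int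
  | 0, _, a, sign, _ => sign * pvE a (n-1) (n-1)
  | steps+1, k, a, sign, prev =>
    -- pivot = a[k][k]; if 0: search a swap row below, else continue
    if pvE a k k = 0 then
      match (List.range' (k+1) (n - (k+1))).find? (fun i => pvE a i k != 0) with
      | none => 0
      | some i =>
        let a' := pvSwapRows a k i
        detBareissLoop n steps (k+1) (pvZeroRow k (pvZeroCol k (pvElim k (pvE a' k k) prev a'))) (-sign) (pvE a' k k)
    else
      detBareissLoop n steps (k+1) (pvZeroRow k (pvZeroCol k (pvElim k (pvE a k k) prev a))) sign (pvE a k k)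

def det_bareiss (mat : List (List Int)) : Int :=
  let n := mat.length
  if n = 0 then 1 else detBareissLoop n (n-1) 0 mat 1 1

-- g = gcd(g, abs(v)) over the list, starting from 0
def gcd_list (values : List Int) : Int :=
  values.foldl (fun g v => ((Int.gcd g |v| : Nat) : Int)) 0

-- itertools.combinations(range(lo, hi), need) in lexicographic order
def pvCombos (lo hi : Nat) : Nat → List (List Nat)
  | 0 => [[]]
  | need + 1 => (List.range' lo (hi - need - lo)).flatMap
      (fun i => (pvCombos (i+1) hi need).map (fun s => i :: s))

-- sub = [[matrix[r][c] for c in col_idx] for r in row_idx]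
def pvSub (matrix : List (List Int)) (ridx cidx : List Nat) : List (List Int) :=
  ridx.map (fun r => cidx.map (fun c => pvE matrix r c))

def minors_gcd (matrix : List (List Int)) (k : Nat) : Int :=
  let rows := matrix.length
  let cols := (matrix.headD []).length
  gcd_list ((pvCombos 0 rows k).flatMap
    (fun ridx => (pvCombos 0 cols k).map (fun cidx => det_bareiss (pvSub matrix ridx cidx))))

-- for k in range(1, max_k+1): … with break on d_k == 0
def smithLoopA (matrix : List (List Int)) : List Nat → Int → List Int → List Int
  | [], _, invs => invs
  | k :: rest, d_prev, invs =>
    let d_k := minors_gcd matrix k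
    if d_k = 0 then invs
    else smithLoopA matrix rest d_k (invs ++ [PySem.Int.floordiv d_k d_prev])

def smith_invariants_from_minors (matrix : List (List Int)) : List Int :=
  let rows := matrix.length
  let cols := (matrix.headD []).length
  smithLoopA matrix (List.range' 1 (min rows cols)) 1 []

-- ===== PORT B =====

-- b = [[(row[j]*p - row[0]*a[0][j]) // prev for j in range(1, len(a))] for row in a[1:]]
def pvCondense (a : List (List Int)) (prev : Int) : List (List Int) :=
  (a.drop 1).map (fun row =>
    (List.range' 1 (a.length - 1)).map (fun j =>
      PySem.Int.floordiv (row.getD j 0 * pvE a 0 0 - row.getD 0 0 * pvE a 0 j) prev))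

-- one-step fraction-free condensation, recursing on a strictly smaller matrix
def detCond (a : List (List Int)) (sign prev : Int) : Int :=
  if a.length = 1 then sign * pvE a 0 0
  else if _h : a.length = 0 then 0   -- unreachable: never called on an empty matrix
  else if pvE a 0 0 = 0 then
    match (List.range' 1 (a.length - 1)).find? (fun i => pvE a i 0 != 0) with
    | none => 0
    | some r =>
      let a' := pvSwapRows a 0 r
      detCond (pvCondense a' prev) (-sign) (pvE a' 0 0)
  else detCond (pvCondense a prev) sign (pvE a 0 0)
termination_by a.length
decreasing_by all_goals simp [pvCondense, pvSwapRows]; omega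

-- fold leaf over all sorted need-subsets of range(lo, hi) in lex order, short-circuit at gcd 1
def foldSubsets (leaf : List Nat → Int → Int) (hi : Nat) : Nat → Nat → List Nat → Int → Int
  | 0, _, chosen, g => if g = 1 then 1 else leaf chosen g
  | need+1, lo, chosen, g =>
    if g = 1 then 1
    else (List.range' lo (hi - need - lo)).foldl
      (fun g i => foldSubsets leaf hi need (i+1) (chosen ++ [i]) g) g

def minorsGcdAlt (matrix : List (List Int)) (cols : Nat) (k : Nat) : Int :=
  foldSubsets (fun rsel g =>
      foldSubsets (fun csel g2 =>
          ((Int.gcd g2 |detCond (pvSub matrix rsel csel) 1 1| : Nat) : Int))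
        cols k 0 [] g)
    matrix.length k 0 [] 0

def smithLoopB (matrix : List (List Int)) (cols : Nat) : List Nat → Int → List Int → List Int
  | [], _, invs => invs
  | k :: rest, d_prev, invs =>
    let d_k := minorsGcdAlt matrix cols k
    if d_k = 0 then invs
    else smithLoopB matrix cols rest d_k (invs ++ [PySem.Int.floordiv d_k d_prev])

def smith_invariants_from_minors_alt (matrix : List (List Int)) : List Int :=
  let rows := matrix.length
  let cols := (matrix.headD []).length
  smithLoopB matrix cols (List.range' 1 (min rows cols)) 1 []

-- ===== PRECONDITION & SPEC =====

-- Pre_ excludes exactly the ragged matrices with a row shorter than the first row,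
-- on which Python A raises IndexError while building the 1×1 minors.
def Pre_smith_invariants_from_minors (matrix : List (List Int)) : Prop :=
  ∀ row ∈ matrix, (matrix.headD []).length ≤ row.length

instance (matrix : List (List Int)) : Decidable (Pre_smith_invariants_from_minors matrix) := by
  unfold Pre_smith_invariants_from_minors; infer_instance

def pvWitness_smith_invariants_from_minors : List (List Int) := [[2, 4], [6, 8]]

def Spec_smith_invariants_from_minors (matrix : List (List Int)) (out : List Int) : Prop := out = smith_invariants_from_minors_alt matrix
instance (matrix : List (List Int)) (out : List Int) : Decidable (Spec_smith_invariants_from_minors matrix out) := by unfold Spec_smith_invariants_from_minors; infer_instance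

-- ===== CLAIM (what is proved, stated in full; the proofs are below) =====
def Claim_equal_smith_invariants_from_minors : Prop := ∀ (matrix : List (List Int)), Dom_smith_invariants_from_minors matrix → Pre_smith_invariants_from_minors matrix → Spec_smith_invariants_from_minors matrix (smith_invariants_from_minors matrix)

-- ===== LEMMAS AND PROOFS =====

theorem pvSwapRows_length (a : List (List Int)) (k i : Nat) :
    (pvSwapRows a k i).length = a.length := by simp [pvSwapRows]

def pvBlock (a : List (List Int)) (k : Nat) : List (List Int) :=
  (a.drop k).map (fun r => r.drop k)

theorem pvBlock_length (a : List (List Int)) (k : Nat) :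
    (pvBlock a k).length = a.length - k := by simp [pvBlock]

theorem pvBlock_getElem (a : List (List Int)) (k i : Nat) (h : i < (pvBlock a k).length) :
    (pvBlock a k)[i] = (a[k+i]'(by simp [pvBlock] at h; omega)).drop k := by
  simp [pvBlock, List.getElem_drop]

theorem pvBlock_getElem? (a : List (List Int)) (k i : Nat) :
    (pvBlock a k)[i]? = a[k+i]?.map (fun r => r.drop k) := by
  simp [pvBlock, List.getElem?_drop]

theorem pvGetD_drop {α : Type} (l : List α) (k c : Nat) (d : α) :
    (l.drop k).getD c d = l.getD (k+c) d := by
  simp [List.getD, List.getElem?_drop]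

theorem pvGetD_map_drop (l : List (List Int)) (r k : Nat) :
    (l.map (fun x => x.drop k)).getD r [] = (l.getD r []).drop k := by
  simp only [List.getD]
  cases h : l[r]? <;> simp [h]

theorem pvE_block (a : List (List Int)) (k r c : Nat) :
    pvE (pvBlock a k) r c = pvE a (k+r) (k+c) := by
  simp only [pvE, pvBlock]
  rw [pvGetD_map_drop, pvGetD_drop, pvGetD_drop]

theorem pvElim_length (k : Nat) (p q : Int) (a : List (List Int)) :
    (pvElim k p q a).length = a.length := by simp [pvElim]
theorem pvZeroCol_length (k : Nat) (a : List (List Int)) :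
    (pvZeroCol k a).length = a.length := by simp [pvZeroCol]
theorem pvZeroRow_length (k : Nat) (a : List (List Int)) :
    (pvZeroRow k a).length = a.length := by simp [pvZeroRow]

theorem pvWF_elim (k : Nat) (p q : Int) (a : List (List Int)) (n : Nat)
    (h : ∀ r ∈ a, r.length = n) : ∀ r ∈ pvElim k p q a, r.length = n := by
  intro r hr
  simp only [pvElim, List.mem_iff_getElem, List.length_mapIdx, List.getElem_mapIdx] at hr
  obtain ⟨i, hi, hr⟩ := hr
  have hai : a[i].length = n := h _ (List.getElem_mem hi)
  rw [← hr]; split <;> simp [hai]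

theorem pvWF_zeroCol (k : Nat) (a : List (List Int)) (n : Nat)
    (h : ∀ r ∈ a, r.length = n) : ∀ r ∈ pvZeroCol k a, r.length = n := by
  intro r hr
  simp only [pvZeroCol, List.mem_iff_getElem, List.length_mapIdx, List.getElem_mapIdx] at hr
  obtain ⟨i, hi, hr⟩ := hr
  have hai : a[i].length = n := h _ (List.getElem_mem hi)
  rw [← hr]; split <;> simp [hai]

theorem pvWF_zeroRow (k : Nat) (a : List (List Int)) (n : Nat)
    (h : ∀ r ∈ a, r.length = n) : ∀ r ∈ pvZeroRow k a, r.length = n := by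
  intro r hr
  simp only [pvZeroRow, List.mem_iff_getElem, List.length_mapIdx, List.getElem_mapIdx] at hr
  obtain ⟨i, hi, hr⟩ := hr
  have hai : a[i].length = n := h _ (List.getElem_mem hi)
  rw [← hr]; split <;> simp [hai]

theorem pvWF_swap (a : List (List Int)) (k i : Nat) (n : Nat) (h : ∀ r ∈ a, r.length = n)
    (hk : k < a.length) (hi : i < a.length) : ∀ r ∈ pvSwapRows a k i, r.length = n := by
  intro r hr
  rcases List.mem_or_eq_of_mem_set hr with hr' | rfl
  · rcases List.mem_or_eq_of_mem_set hr' with hr'' | rfl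
    · exact h r hr''
    · exact h _ (by rw [List.getD_eq_getElem _ _ hi]; exact List.getElem_mem hi)
  · exact h _ (by rw [List.getD_eq_getElem _ _ hk]; exact List.getElem_mem hk)

theorem pvBlock_swap (a : List (List Int)) (k r : Nat) (hk : k < a.length)
    (hr : k + r < a.length) :
    pvBlock (pvSwapRows a k (k + r)) k = pvSwapRows (pvBlock a k) 0 r := by
  have hget : ∀ i, ∀ hi : i < a.length, a.getD i [] = a[i]'hi := by
    intro i hi; exact List.getD_eq_getElem a [] hi
  have hbget : ∀ i, ∀ hi : k + i < a.length, (pvBlock a k).getD i [] = (a[k+i]'hi).drop k := by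
    intro i hi
    rw [List.getD, pvBlock_getElem?, List.getElem?_eq_getElem hi]
    simp
  apply List.ext_getElem?
  intro i
  simp only [pvSwapRows, pvBlock_getElem?, List.getElem?_set, List.length_set,
    pvBlock_length]
  rw [hget k hk, hget (k+r) hr, hbget 0 (by omega), hbget r (by omega)]
  rcases eq_or_ne i r with rfl | hir
  · have h1 : i < a.length - k := by omega
    simp [hr, h1]
  · rcases eq_or_ne i 0 with rfl | hi0
    · have h1 : ¬ (k + r = k + 0) := by omega
      have h2 : 0 < a.length - k := by omega
      simp [Ne.symm hir, hk, h2]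
    · simp [hi0, Ne.symm hir, Ne.symm hi0]

theorem pvBlock_elim (a : List (List Int)) (n k : Nat) (prev : Int)
    (hn : a.length = n) (hwf : ∀ r ∈ a, r.length = n) (hk : k + 1 < n) :
    pvBlock (pvZeroRow k (pvZeroCol k (pvElim k (pvE a k k) prev a))) (k+1)
      = pvCondense (pvBlock a k) prev := by
  have hlen3 : (pvZeroRow k (pvZeroCol k (pvElim k (pvE a k k) prev a))).length = n := by
    simp [pvZeroRow, pvZeroCol, pvElim, hn]
  apply List.ext_getElem
  · simp [pvBlock_length, hlen3, pvCondense, pvBlock_length, hn]; omega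
  · intro i h1 h2
    have hib : k + 1 + i < n := by
      rw [pvBlock_length, hlen3] at h1; omega
    have hia : k + 1 + i < a.length := by omega
    have hrowlen : a[k+1+i].length = n := hwf _ (List.getElem_mem hia)
    have hL : (pvBlock (pvZeroRow k (pvZeroCol k (pvElim k (pvE a k k) prev a))) (k+1))[i]
        = (((a[k+1+i]'hia).mapIdx (fun j x => if k < j then
            PySem.Int.floordiv (x * pvE a k k - (a[k+1+i]'hia).getD k 0 * pvE a k j) prev else x)).set k 0).drop (k+1) := by
      rw [pvBlock_getElem (h := h1)]
      simp only [pvZeroRow, pvZeroCol, pvElim, List.getElem_mapIdx]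
      rw [if_neg (by omega), if_pos (by omega), if_pos (by omega)]
    have hR : (pvCondense (pvBlock a k) prev)[i]
        = (List.range' 1 ((pvBlock a k).length - 1)).map (fun j =>
            PySem.Int.floordiv (((a[k+1+i]'hia).drop k).getD j 0 * pvE (pvBlock a k) 0 0
              - ((a[k+1+i]'hia).drop k).getD 0 0 * pvE (pvBlock a k) 0 j) prev) := by
      simp only [pvCondense]
      rw [List.getElem_map, List.getElem_drop]
      have hb : (pvBlock a k)[1+i]'(by rw [pvBlock_length]; omega) = (a[k+1+i]'hia).drop k := by
        rw [pvBlock_getElem (h := by rw [pvBlock_length]; omega)]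
        simp only [show k + (1+i) = k+1+i from by omega]
      rw [hb]
    rw [hL, hR]
    apply List.ext_getElem
    · simp [List.length_drop, List.length_set, List.length_mapIdx, hrowlen,
        List.length_map, List.length_range', pvBlock_length, hn]
      omega
    · intro j hj1 hj2
      have hjlen : j < n - (k+1) := by
        simpa [hrowlen] using hj1
      have hjn : k + 1 + j < n := by omega
      simp only [List.getElem_drop, List.getElem_map, List.getElem_range'_1,
        List.getElem_mapIdx, List.getElem_set]
      rw [if_neg (by omega : ¬ k = k + 1 + j)]
      rw [if_pos (by omega : k < k + 1 + j)]
      rw [pvE_block, pvE_block, pvGetD_drop, pvGetD_drop]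
      rw [List.getD_eq_getElem _ _ (by omega : k + (1 + j) < (a[k+1+i]'hia).length)]
      rw [List.getD_eq_getElem _ _ (by omega : k + 0 < (a[k+1+i]'hia).length)]
      have e1 : k + (1 + j) = k + 1 + j := by omega
      have e2 : k + 0 = k := by omega
      simp only [e1, e2]
      simp only [List.getD_eq_getElem _ _ (by omega : k < (a[k+1+i]'hia).length)]

theorem pvDet_sim (m : Nat) : ∀ (n k : Nat) (a : List (List Int)) (sign prev : Int),
    a.length = n → (∀ r ∈ a, r.length = n) → k < n → m = n - k →
    detBareissLoop n (n-1-k) k a sign prev = detCond (pvBlock a k) sign prev := by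
  induction m with
  | zero => intro n k a sign prev hn hwf hk hm; omega
  | succ m ih =>
    intro n k a sign prev hn hwf hk hm
    by_cases hbase : n = k + 1
    · rw [show n-1-k = 0 from by omega, detBareissLoop]
      rw [detCond, if_pos (by rw [pvBlock_length]; omega)]
      rw [pvE_block, show k+0 = n-1 from by omega]
    · have hk1 : k + 1 < n := by omega
      have hblen : (pvBlock a k).length = n - k := by rw [pvBlock_length, hn]
      have hrange : (List.range' 1 (n-(k+1))).map (fun x => k + x) = List.range' (k+1) (n-(k+1)) :=
        List.map_add_range' 1 (n-(k+1)) 1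
      have hcong : ((fun i => pvE a i k != 0) ∘ fun x => k + x)
          = (fun r => pvE (pvBlock a k) r 0 != 0) := by
        funext r
        simp [Function.comp, pvE_block]
      have hfind : (List.range' (k+1) (n-(k+1))).find? (fun i => pvE a i k != 0)
          = ((List.range' 1 (n-(k+1))).find? (fun r => pvE (pvBlock a k) r 0 != 0)).map (fun x => k + x) := by
        rw [← hrange, List.find?_map, hcong]
      have step : ∀ (a2 : List (List Int)) (s2 : Int), a2.length = n → (∀ r ∈ a2, r.length = n) →
          detBareissLoop n (n-1-(k+1)) (k+1) (pvZeroRow k (pvZeroCol k (pvElim k (pvE a2 k k) prev a2))) s2 (pvE a2 k k)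
            = detCond (pvCondense (pvBlock a2 k) prev) s2 (pvE a2 k k) := by
        intro a2 s2 hn2 hwf2
        have hz := pvBlock_elim a2 n k prev hn2 hwf2 hk1
        rw [ih n (k+1) _ s2 (pvE a2 k k)
          (by simp [pvZeroRow_length, pvZeroCol_length, pvElim_length, hn2])
          (pvWF_zeroRow _ _ _ (pvWF_zeroCol _ _ _ (pvWF_elim _ _ _ _ _ hwf2)))
          hk1 (by omega)]
        rw [hz]
      rw [show n-1-k = (n-1-(k+1))+1 from by omega, detBareissLoop]
      by_cases hp : pvE a k k = 0
      · rw [if_pos hp]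
        rw [detCond, if_neg (by rw [hblen]; omega), dif_neg (by rw [hblen]; omega)]
        rw [show pvE (pvBlock a k) 0 0 = pvE a k k from by rw [pvE_block]; simp]
        rw [if_pos hp]
        rw [show (pvBlock a k).length - 1 = n - (k+1) from by rw [hblen]; omega]
        rw [hfind]
        cases hf2 : (List.range' 1 (n-(k+1))).find? (fun r => pvE (pvBlock a k) r 0 != 0) with
        | none => rfl
        | some r =>
          simp only [Option.map_some]
          have hrmem : 1 ≤ r ∧ r < 1 + (n - (k+1)) :=
            List.mem_range'_1.mp (List.mem_of_find?_eq_some hf2)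
          have hswap : pvBlock (pvSwapRows a k (k + r)) k = pvSwapRows (pvBlock a k) 0 r :=
            pvBlock_swap a k r (by omega) (by omega)
          show detBareissLoop n (n-1-(k+1)) (k+1)
              (pvZeroRow k (pvZeroCol k (pvElim k (pvE (pvSwapRows a k (k+r)) k k) prev (pvSwapRows a k (k+r)))))
              (-sign) (pvE (pvSwapRows a k (k+r)) k k)
            = detCond (pvCondense (pvSwapRows (pvBlock a k) 0 r) prev) (-sign)
                (pvE (pvSwapRows (pvBlock a k) 0 r) 0 0)
          rw [step (pvSwapRows a k (k+r)) (-sign) (by rw [pvSwapRows_length, hn])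
            (pvWF_swap a k (k+r) n hwf (by omega) (by omega))]
          rw [← hswap, pvE_block]
          simp
      · rw [if_neg hp]
        rw [detCond, if_neg (by rw [hblen]; omega), dif_neg (by rw [hblen]; omega)]
        rw [show pvE (pvBlock a k) 0 0 = pvE a k k from by rw [pvE_block]; simp]
        rw [if_neg hp]
        exact step a sign hn hwf

theorem pvDet_eq (mat : List (List Int)) (ridx cidx : List Nat)
    (hlen : cidx.length = ridx.length) (hpos : 0 < ridx.length) :
    det_bareiss (pvSub mat ridx cidx) = detCond (pvSub mat ridx cidx) 1 1 := by
  have hsub : (pvSub mat ridx cidx).length = ridx.length := by simp [pvSub]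
  have hwf : ∀ r ∈ pvSub mat ridx cidx, r.length = ridx.length := by
    intro r hr
    simp only [pvSub, List.mem_map] at hr
    obtain ⟨x, _, rfl⟩ := hr
    simp [hlen]
  have h0 : pvBlock (pvSub mat ridx cidx) 0 = pvSub mat ridx cidx := by
    simp [pvBlock]
  rw [det_bareiss]
  simp only [hsub]
  rw [if_neg (by omega)]
  have := pvDet_sim ridx.length ridx.length 0 (pvSub mat ridx cidx) 1 1 hsub hwf hpos rfl
  simp only [Nat.sub_zero] at this
  rw [this, h0]

theorem pvCombos_length (need : Nat) :
    ∀ lo hi s, s ∈ pvCombos lo hi need → s.length = need := by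
  induction need with
  | zero => intro lo hi s hs; simp [pvCombos] at hs; simp [hs]
  | succ need ih =>
    intro lo hi s hs
    simp only [pvCombos, List.mem_flatMap, List.mem_map] at hs
    obtain ⟨i, _, t, ht, rfl⟩ := hs
    simp [ih _ _ _ ht]

theorem pvFoldl_one {α : Type} (f : Int → α → Int) (l : List α)
    (habs : ∀ x, f 1 x = 1) : l.foldl f 1 = 1 := by
  induction l with
  | nil => rfl
  | cons x xs ih => simp [List.foldl_cons, habs, ih]

theorem pvFoldSubsets_eq (leaf : List Nat → Int → Int) (hi : Nat)
    (habs : ∀ c, leaf c 1 = 1) :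
    ∀ (need lo : Nat) (chosen : List Nat) (g : Int),
      foldSubsets leaf hi need lo chosen g
        = (pvCombos lo hi need).foldl (fun g s => leaf (chosen ++ s) g) g := by
  intro need
  induction need with
  | zero =>
    intro lo chosen g
    rw [foldSubsets]
    by_cases hg : g = 1
    · simp [hg, pvCombos, habs]
    · simp [hg, pvCombos]
  | succ need ihn =>
    intro lo chosen g
    rw [foldSubsets]
    have hfun : (fun (g : Int) (i : Nat) => foldSubsets leaf hi need (i+1) (chosen ++ [i]) g)
        = (fun (acc : Int) (i : Nat) =>
            ((pvCombos (i+1) hi need).map (fun s => i :: s)).foldl (fun g s => leaf (chosen ++ s) g) acc) := by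
      funext g i
      rw [List.foldl_map, ihn (i+1) (chosen ++ [i]) g]
      congr 1
      funext g s
      rw [List.append_assoc, List.singleton_append]
    by_cases hg : g = 1
    · rw [if_pos hg, hg]
      exact (pvFoldl_one _ _ (fun s => habs (chosen ++ s))).symm
    · rw [if_neg hg]
      rw [show pvCombos lo hi (need+1)
          = (List.range' lo (hi - need - lo)).flatMap (fun i => (pvCombos (i+1) hi need).map (fun s => i :: s)) from rfl]
      rw [List.foldl_flatMap, hfun]

theorem pvFoldSubsets_one (leaf : List Nat → Int → Int) (hi need lo : Nat) (chosen : List Nat) :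
    foldSubsets leaf hi need lo chosen 1 = 1 := by
  cases need <;> rw [foldSubsets] <;> simp

theorem pvMinors_eq (matrix : List (List Int)) (k : Nat) (hk : 0 < k) :
    minors_gcd matrix k = minorsGcdAlt matrix (matrix.headD []).length k := by
  have habs_col : ∀ rsel (c : List Nat),
      ((Int.gcd (1 : Int) |detCond (pvSub matrix rsel c) 1 1| : Nat) : Int) = 1 := by
    intro rsel c; simp
  have habs_row : ∀ c : List Nat,
      foldSubsets (fun csel g2 => ((Int.gcd g2 |detCond (pvSub matrix c csel) 1 1| : Nat) : Int))
        (matrix.headD []).length k 0 [] 1 = 1 := by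
    intro c; exact pvFoldSubsets_one _ _ _ _ _
  rw [minorsGcdAlt]
  rw [pvFoldSubsets_eq _ _ habs_row]
  rw [minors_gcd, gcd_list]
  simp only [List.foldl_flatMap, List.foldl_map, List.nil_append]
  apply PySem.List.foldl_congr_mem
  intro acc ridx hridx
  rw [pvFoldSubsets_eq _ _ (habs_col ridx)]
  simp only [List.nil_append]
  apply PySem.List.foldl_congr_mem
  intro acc2 cidx hcidx
  rw [pvDet_eq matrix ridx cidx
    (by rw [pvCombos_length _ _ _ _ hcidx, pvCombos_length _ _ _ _ hridx])
    (by rw [pvCombos_length _ _ _ _ hridx]; omega)]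

theorem pvSmithLoop_eq (matrix : List (List Int)) :
    ∀ (l : List Nat) (d : Int) (invs : List Int), (∀ k ∈ l, 0 < k) →
      smithLoopA matrix l d invs = smithLoopB matrix (matrix.headD []).length l d invs := by
  intro l
  induction l with
  | nil => intro d invs _; rfl
  | cons k rest ih =>
    intro d invs hpos
    rw [smithLoopA, smithLoopB]
    rw [← pvMinors_eq matrix k (hpos k (by simp))]
    by_cases h0 : minors_gcd matrix k = 0
    · rw [if_pos h0, if_pos h0]
    · rw [if_neg h0, if_neg h0]
      exact ih _ _ (fun x hx => hpos x (by simp [hx]))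

-- ===== VERDICT (by name: the statement is the Claim_ definition above) =====
theorem smith_invariants_from_minors_spec : Claim_equal_smith_invariants_from_minors := by
  intro matrix _hdom _hpre
  unfold Spec_smith_invariants_from_minors
  simp only [smith_invariants_from_minors, smith_invariants_from_minors_alt]
  exact pvSmithLoop_eq matrix _ 1 []
    (fun k hk => by have := List.mem_range'_1.mp hk; omega)
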